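-- pv_equiv track=rewrite | github.com/lucasmoeskops/codility | dominator/main.py | solution
-- ===== SOURCE A (Python) =====
-- from collections import Counter
--
-- def solution(A):
--     # write your code in Python 3.6
--     counter = Counter()
--     limit = len(A) // 2
--
--     for index, value in enumerate(A):
--         counter[value] += 1
--
--         if counter[value] > limit:
--             return index
--
--     return -1
-- ===== SOURCE B (Python) =====
-- from collections import Counter
--
-- def solution(A):
--     limit = len(A) // 2
--     counts = Counter(A)
--     target = None
--     for v, c in counts.items():
--         if c > limit:
--             target = v
--             break
--     if target is None:
--         return -1
--     seen = 0
--     for index, value in enumerate(A):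
--         if value == target:
--             seen += 1
--             if seen > limit:
--                 return index
--     return -1
-- ===== Notes on version B (the rewrite author's own statement) =====
-- stated objective: alternative
-- what changed: A interleaves counting and the threshold check in one enumerate pass with early return; B first tallies the whole array with Counter(A), picks the unique value whose total count exceeds len(A)//2 (returning -1 if none), then does a targeted scan counting only that value to find the index where its running count first exceeds the half.
import Mathlib
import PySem

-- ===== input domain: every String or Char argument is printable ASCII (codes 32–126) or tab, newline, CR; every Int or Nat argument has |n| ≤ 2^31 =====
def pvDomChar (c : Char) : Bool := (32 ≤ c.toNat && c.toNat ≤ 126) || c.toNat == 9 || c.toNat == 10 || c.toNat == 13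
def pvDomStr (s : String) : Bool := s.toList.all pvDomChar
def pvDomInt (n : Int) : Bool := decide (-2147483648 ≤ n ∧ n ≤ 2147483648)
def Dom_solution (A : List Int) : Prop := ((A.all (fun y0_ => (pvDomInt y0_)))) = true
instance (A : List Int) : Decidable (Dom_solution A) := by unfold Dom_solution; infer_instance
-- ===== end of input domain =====

-- B replaces A's single interleaved count-and-check pass by a full Counter tally, a unique-dominator
-- lookup, and a targeted scan counting only the dominator (objective: alternative decomposition).

-- ===== PORT A =====
-- the for-loop over enumerate(A) with early return; counter[value] += 1 is Dict.modify value 0 (·+1)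
def solutionLoopA (limit : Int) : List (Int × Int) → PySem.Dict Int Int → Int
  | [], _ => -1
  | (index, value) :: rest, counter =>
      let counter' := counter.modify value 0 (· + 1)
      if counter'.getD value 0 > limit then index
      else solutionLoopA limit rest counter'

def solution (A : List Int) : Int :=
  solutionLoopA (PySem.Int.floordiv (A.length : Int) 2) (PySem.List.enumerate A) PySem.Dict.empty

-- ===== PORT B =====
-- the 'for v, c in counts.items(): … break' loop returning the first value with c > limit
def findTarget (limit : Int) : List (Int × Int) → Option Int
  | [] => none
  | (v, c) :: rest => if c > limit then some v else findTarget limit rest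

-- the second enumerate pass of B, counting only the target value
def scanLoopB (limit target : Int) : List (Int × Int) → Int → Int
  | [], _ => -1
  | (index, value) :: rest, seen =>
      if value = target then
        if seen + 1 > limit then index else scanLoopB limit target rest (seen + 1)
      else scanLoopB limit target rest seen

def solution_alt (A : List Int) : Int :=
  let limit := PySem.Int.floordiv (A.length : Int) 2
  let counts := PySem.Dict.counter A
  match findTarget limit counts.items with
  | none => -1
  | some target => scanLoopB limit target (PySem.List.enumerate A) 0

-- ===== PRECONDITION & SPEC =====
def Spec_solution (A : List Int) (out : Int) : Prop := out = solution_alt A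
instance (A : List Int) (out : Int) : Decidable (Spec_solution A out) := by unfold Spec_solution; infer_instance

-- ===== CLAIM (what is proved, stated in full; the proofs are below) =====
def Claim_equal_solution : Prop := ∀ (A : List Int), Dom_solution A → Spec_solution A (solution A)

-- ===== LEMMAS AND PROOFS =====

theorem findTarget_none (limit : Int) : ∀ (ps : List (Int × Int)),
    findTarget limit ps = none → ∀ p ∈ ps, p.2 ≤ limit := by
  intro ps
  induction ps with
  | nil => intro _ p hp; simp at hp
  | cons q qs ih =>
      intro h p hp
      obtain ⟨v, c⟩ := q
      by_cases hc : c > limit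
      · simp [findTarget, hc] at h
      · rcases List.mem_cons.mp hp with rfl | hp'
        · exact le_of_not_gt hc
        · exact ih (by simpa [findTarget, hc] using h) p hp'

theorem findTarget_some (limit t : Int) : ∀ (ps : List (Int × Int)),
    findTarget limit ps = some t → ∃ c, (t, c) ∈ ps ∧ c > limit := by
  intro ps
  induction ps with
  | nil => intro h; simp [findTarget] at h
  | cons q qs ih =>
      intro h
      obtain ⟨v, c⟩ := q
      by_cases hc : c > limit
      · have hv : v = t := by simpa [findTarget, hc] using h
        exact ⟨c, by simp [hv], hc⟩
      · obtain ⟨c', hm, hc'⟩ := ih (by simpa [findTarget, hc] using h)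
        exact ⟨c', List.mem_cons_of_mem _ hm, hc'⟩

-- two distinct values' occurrence counts fit in the list's length
theorem count_add_count_le (t v : Int) (A : List Int) (h : t ≠ v) :
    A.count t + A.count v ≤ A.length := by
  induction A with
  | nil => simp
  | cons x xs ih =>
      simp only [List.count_cons, List.length_cons, beq_iff_eq]
      split_ifs with h1 h2
      · exact absurd (h1.symm.trans h2) h
      · omega
      · omega
      · omega

-- A's loop never fires when every remaining value's total count stays ≤ limit
theorem loopA_none (limit : Int) (rest : List Int) :
    ∀ (pre : List Int) (s : Int) (d : PySem.Dict Int Int),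
    (∀ v, d.getD v 0 = (pre.count v : Int)) →
    (∀ v ∈ rest, ((pre ++ rest).count v : Int) ≤ limit) →
    solutionLoopA limit (PySem.List.enumerate rest s) d = -1 := by
  induction rest with
  | nil => intro pre s d _ _; simp [PySem.List.enumerate_nil, solutionLoopA]
  | cons x xs ih =>
      intro pre s d hd hb
      rw [PySem.List.enumerate_cons]
      have hx : (d.modify x 0 (· + 1)).getD x 0 = ((pre ++ [x]).count x : Int) := by
        simp [PySem.Dict.getD_modify_self, hd x, List.count_append]
      have hxle : ((pre ++ [x]).count x : Int) ≤ limit := by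
        have h1 := hb x (List.mem_cons_self ..)
        have : (pre ++ [x]).count x ≤ (pre ++ x :: xs).count x := by
          simp [List.count_append]
        omega
      have hnf : ¬ ((d.modify x 0 (· + 1)).getD x 0 > limit) := by rw [hx]; omega
      simp only [solutionLoopA]
      rw [if_neg hnf]
      refine ih (pre ++ [x]) (s + 1) _ ?_ ?_
      · intro v
        by_cases hvx : v = x
        · subst hvx; simpa using hx
        · rw [PySem.Dict.getD_modify_of_ne _ 0 _ hvx, hd v]
          have : (pre ++ [x]).count v = pre.count v := by
            simp [List.count_append, Ne.symm hvx]
          rw [this]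
      · intro v hv
        have := hb v (List.mem_cons_of_mem _ hv)
        simpa [List.count_append, List.count_cons] using this

-- with a unique dominator t, A's interleaved pass agrees with B's targeted scan
theorem loopA_eq_scan (limit t : Int) (rest : List Int) :
    ∀ (pre : List Int) (s : Int) (d : PySem.Dict Int Int) (seen : Int),
    (∀ v, d.getD v 0 = (pre.count v : Int)) →
    seen = (pre.count t : Int) →
    (∀ v, v ≠ t → ((pre ++ rest).count v : Int) ≤ limit) →
    solutionLoopA limit (PySem.List.enumerate rest s) d
      = scanLoopB limit t (PySem.List.enumerate rest s) seen := by
  induction rest with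
  | nil =>
      intro pre s d seen _ _ _
      simp [PySem.List.enumerate_nil, solutionLoopA, scanLoopB]
  | cons x xs ih =>
      intro pre s d seen hd hseen hb
      rw [PySem.List.enumerate_cons]
      have hx : (d.modify x 0 (· + 1)).getD x 0 = ((pre ++ [x]).count x : Int) := by
        simp [PySem.Dict.getD_modify_self, hd x, List.count_append]
      have hd' : ∀ v, (d.modify x 0 (· + 1)).getD v 0 = ((pre ++ [x]).count v : Int) := by
        intro v
        by_cases hvx : v = x
        · subst hvx; simpa using hx
        · rw [PySem.Dict.getD_modify_of_ne _ 0 _ hvx, hd v]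
          have : (pre ++ [x]).count v = pre.count v := by
            simp [List.count_append, Ne.symm hvx]
          rw [this]
      by_cases hxt : x = t
      · subst hxt
        have hcnt : ((pre ++ [x]).count x : Int) = seen + 1 := by
          simp [List.count_append, hseen]
        have hseen' : seen + 1 = ((pre ++ [x]).count x : Int) := hcnt.symm
        by_cases hfire : seen + 1 > limit
        · simp only [solutionLoopA, scanLoopB, hx, hcnt, if_true]
          rw [if_pos hfire, if_pos hfire]
        · simp only [solutionLoopA, scanLoopB, hx, hcnt, if_true]
          rw [if_neg hfire, if_neg hfire]
          refine ih (pre ++ [x]) (s + 1) _ (seen + 1) hd' ?_ ?_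
          · simp [List.count_append, hseen]
          · intro v hv
            have := hb v hv
            simpa [List.count_append, List.count_cons] using this
      · have hxle : ((pre ++ [x]).count x : Int) ≤ limit := by
          have h1 := hb x hxt
          have : (pre ++ [x]).count x ≤ (pre ++ x :: xs).count x := by
            simp [List.count_append]
          omega
        have hnf : ¬ ((d.modify x 0 (· + 1)).getD x 0 > limit) := by rw [hx]; omega
        simp only [solutionLoopA, scanLoopB]
        rw [if_neg hxt, if_neg hnf]
        refine ih (pre ++ [x]) (s + 1) _ seen hd' ?_ ?_
        · rw [hseen]
          have : (pre ++ [x]).count t = pre.count t := by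
            simp [List.count_append, hxt]
          rw [this]
        · intro v hv
          have := hb v hv
          simpa [List.count_append, List.count_cons] using this

-- ===== VERDICT (by name: the statement is the Claim_ definition above) =====
theorem solution_spec : Claim_equal_solution := by
  intro A _
  show solution A = solution_alt A
  unfold solution solution_alt
  have hL : PySem.Int.floordiv (A.length : Int) 2 = ((A.length / 2 : Nat) : Int) := by
    exact_mod_cast PySem.Int.floordiv_natCast A.length 2
  set limit := PySem.Int.floordiv (A.length : Int) 2 with hlim
  have hd0 : ∀ v : Int,
      (PySem.Dict.empty : PySem.Dict Int Int).getD v 0 = (([] : List Int).count v : Int) := by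
    intro v
    simp [PySem.Dict.empty, PySem.Dict.getD, PySem.Dict.get?]
  cases hft : findTarget limit (PySem.Dict.counter A).items with
  | none =>
      simp only [hft]
      refine loopA_none limit A [] 0 _ hd0 ?_
      intro v hv
      have hmem : (v, (A.count v : Int)) ∈ (PySem.Dict.counter A).items := by
        rw [PySem.Dict.items_counter]
        exact List.mem_map_of_mem (by simpa [PySem.Set.mem_ofList] using hv)
      simpa using findTarget_none limit _ hft _ hmem
  | some t =>
      simp only [hft]
      obtain ⟨c, hmem, hc⟩ := findTarget_some limit t _ hft
      rw [PySem.Dict.items_counter] at hmem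
      obtain ⟨k, hk, hkt⟩ := List.mem_map.mp hmem
      injection hkt with h1 h2
      subst h1
      subst h2
      refine loopA_eq_scan limit _ A [] 0 _ 0 hd0 (by simp) ?_
      intro v hvt
      have hsum := count_add_count_le _ v A (Ne.symm hvt)
      rw [hL] at hc ⊢
      simp only [List.nil_append]
      omega
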